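-- pv_equiv track=rewrite | github.com/JapaLcK/Bot_Financeiro | core/handlers/help_handler.py | _infer_precise_help
-- ===== SOURCE A (Python) =====
-- def _infer_precise_help(norm: str) -> str | None:
--     if "cartao" in norm or "cartão" in norm or "cartoes" in norm or "cartões" in norm:
--         if any(expr in norm for expr in ("apagar", "apago", "excluir", "remover", "deletar")) and "compra" not in norm:
--             return (
--                 "🗑️ Para apagar um cartão, use o nome dele.\n"
--                 "Exemplo: `excluir cartao Nubank`.\n\n"
--                 "Eu vou pedir confirmação antes de remover."
--             )
--
--     if any(expr in norm for expr in ("lancamento", "lançamento", "lancamentos", "lançamentos")):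
--         if any(expr in norm for expr in ("fazer", "faco", "faço", "criar", "registrar")):
--             return (
--                 "🧾 Para fazer um lançamento, você pode usar:\n"
--                 "• `gastei 50 mercado`\n"
--                 "• `recebi 1000 salario`\n\n"
--                 "Se quiser ver depois, use `listar lançamentos`."
--             )
--         if any(expr in norm for expr in ("apagar", "apago", "excluir", "remover")):
--             return (
--                 "🗑️ Para apagar um lançamento comum, use o número dele.\n"
--                 "Exemplo: `apagar 17`."
--             )
--
--     if any(expr in norm for expr in ("compra", "compras")) and any(expr in norm for expr in ("cartao", "cartão", "credito", "crédito")):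
--         if any(expr in norm for expr in ("apagar", "apago", "excluir", "remover", "desfazer")):
--             return (
--                 "🗑️ Para apagar uma compra no crédito, use o código dela.\n"
--                 "Exemplo: `apagar CC17`."
--             )
--         if any(expr in norm for expr in ("fazer", "faco", "faço", "registrar", "lancar", "lançar")):
--             return (
--                 "💳 Para registrar uma compra no crédito, use:\n"
--                 "• `credito 150 mercado`\n"
--                 "• `credito Nubank 150 mercado`\n"
--                 "• `gastei 150 no cartao Nubank`\n\n"
--                 "Depois eu mostro um código como `CC17` para você apagar com `apagar CC17`."
--             )
--
--     if any(expr in norm for expr in ("parcela", "parcelas", "parcelamento")):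
--         if any(expr in norm for expr in ("apagar", "apago", "excluir", "remover", "desfazer")):
--             return (
--                 "🗑️ Para apagar um parcelamento, use o código dele.\n"
--                 "Exemplo: `apagar PCAB12CD34`.\n\n"
--                 "Se quiser descobrir o código, mande `parcelamentos`."
--             )
--         if any(expr in norm for expr in ("fazer", "faco", "faço", "criar", "registrar", "parcelar")):
--             return (
--                 "💳 Para parcelar uma compra, use:\n"
--                 "• `parcelar 600 em 3x no cartao Nubank`\n"
--                 "• `parcelei 300 em 6x no cartao Nubank`"
--             )
--
--     if "caixinha" in norm or "caixinhas" in norm: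
--         if any(expr in norm for expr in ("fazer", "faco", "faço", "criar", "abrir")):
--             return (
--                 "📦 Para criar uma caixinha, use:\n"
--                 "• `criar caixinha viagem`"
--             )
--         if any(expr in norm for expr in ("colocar", "depositar", "guardar")):
--             return (
--                 "📦 Para colocar dinheiro numa caixinha, use:\n"
--                 "• `coloquei 300 na caixinha viagem`"
--             )
--
--     if any(expr in norm for expr in ("ofx", "extrato")) and any(expr in norm for expr in ("importar", "enviar")):
--         return (
--             "🧾 Para importar um OFX, envie o arquivo `.ofx` junto com a mensagem:\n"
--             "• `importar ofx`"
--         )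
--
--     if "fatura" in norm and any(expr in norm for expr in ("ver", "consultar", "pagar", "registrar")):
--         return (
--             "🧾 Para consultar ou pagar uma fatura, use:\n"
--             "• `fatura Nubank`\n"
--             "• `listar faturas`\n"
--             "• `pagar fatura Nubank 1200`\n"
--             "• `pagar fatura Nubank com saldo`"
--         )
--
--     return None
-- ===== SOURCE B (Python) =====
-- # B: one pass over a keyword universe builds an integer bitmask of the keywords
-- # present in `norm`; the rules become pure bitwise tests against precomputed
-- # constant masks, scanned in A's order.
--
-- _KEYWORDS = [
--     "cartao", "cartão", "cartoes", "cartões",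
--     "apagar", "apago", "excluir", "remover", "deletar",
--     "compra", "compras",
--     "lancamento", "lançamento", "lancamentos", "lançamentos",
--     "ver", "consultar", "pagar",
--     "fazer", "faco", "faço", "criar", "registrar",
--     "credito", "crédito", "desfazer", "lancar", "lançar",
--     "parcela", "parcelas", "parcelamento", "parcelar",
--     "caixinha", "caixinhas", "abrir",
--     "colocar", "depositar", "guardar",
--     "ofx", "extrato", "importar", "enviar",
--     "fatura",
-- ]
--
--
-- def _mask_of(words):
--     m = 0
--     for w in words:
--         m += 1 << _KEYWORDS.index(w)
--     return m
--
--
-- MSG_CARD_DELETE = (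
--     "🗑️ Para apagar um cartão, use o nome dele.\n"
--     "Exemplo: `excluir cartao Nubank`.\n\n"
--     "Eu vou pedir confirmação antes de remover."
-- )
-- MSG_ENTRY_CREATE = (
--     "🧾 Para fazer um lançamento, você pode usar:\n"
--     "• `gastei 50 mercado`\n"
--     "• `recebi 1000 salario`\n\n"
--     "Se quiser ver depois, use `listar lançamentos`."
-- )
-- MSG_ENTRY_DELETE = (
--     "🗑️ Para apagar um lançamento comum, use o número dele.\n"
--     "Exemplo: `apagar 17`."
-- )
-- MSG_PURCHASE_DELETE = (
--     "🗑️ Para apagar uma compra no crédito, use o código dela.\n"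
--     "Exemplo: `apagar CC17`."
-- )
-- MSG_PURCHASE_CREATE = (
--     "💳 Para registrar uma compra no crédito, use:\n"
--     "• `credito 150 mercado`\n"
--     "• `credito Nubank 150 mercado`\n"
--     "• `gastei 150 no cartao Nubank`\n\n"
--     "Depois eu mostro um código como `CC17` para você apagar com `apagar CC17`."
-- )
-- MSG_INSTALLMENT_DELETE = (
--     "🗑️ Para apagar um parcelamento, use o código dele.\n"
--     "Exemplo: `apagar PCAB12CD34`.\n\n"
--     "Se quiser descobrir o código, mande `parcelamentos`."
-- )
-- MSG_INSTALLMENT_CREATE = (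
--     "💳 Para parcelar uma compra, use:\n"
--     "• `parcelar 600 em 3x no cartao Nubank`\n"
--     "• `parcelei 300 em 6x no cartao Nubank`"
-- )
-- MSG_BOX_CREATE = (
--     "📦 Para criar uma caixinha, use:\n"
--     "• `criar caixinha viagem`"
-- )
-- MSG_BOX_DEPOSIT = (
--     "📦 Para colocar dinheiro numa caixinha, use:\n"
--     "• `coloquei 300 na caixinha viagem`"
-- )
-- MSG_OFX = (
--     "🧾 Para importar um OFX, envie o arquivo `.ofx` junto com a mensagem:\n"
--     "• `importar ofx`"
-- )
-- MSG_INVOICE = (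
--     "🧾 Para consultar ou pagar uma fatura, use:\n"
--     "• `fatura Nubank`\n"
--     "• `listar faturas`\n"
--     "• `pagar fatura Nubank 1200`\n"
--     "• `pagar fatura Nubank com saldo`"
-- )
--
-- _CARD = _mask_of(("cartao", "cartão", "cartoes", "cartões"))
-- _ENTRY = _mask_of(("lancamento", "lançamento", "lancamentos", "lançamentos"))
-- _PURCHASE = _mask_of(("compra", "compras"))
-- _CREDIT_CTX = _mask_of(("cartao", "cartão", "credito", "crédito"))
-- _PARCEL = _mask_of(("parcela", "parcelas", "parcelamento"))
-- _BOX = _mask_of(("caixinha", "caixinhas"))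
--
-- # each rule: (list of required group masks, forbidden mask, message), in A's order
-- _RULES = [
--     ([_CARD, _mask_of(("apagar", "apago", "excluir", "remover", "deletar"))],
--      _mask_of(("compra",)), MSG_CARD_DELETE),
--     ([_ENTRY, _mask_of(("fazer", "faco", "faço", "criar", "registrar"))], 0, MSG_ENTRY_CREATE),
--     ([_ENTRY, _mask_of(("apagar", "apago", "excluir", "remover"))], 0, MSG_ENTRY_DELETE),
--     ([_PURCHASE, _CREDIT_CTX,
--       _mask_of(("apagar", "apago", "excluir", "remover", "desfazer"))], 0, MSG_PURCHASE_DELETE),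
--     ([_PURCHASE, _CREDIT_CTX,
--       _mask_of(("fazer", "faco", "faço", "registrar", "lancar", "lançar"))], 0, MSG_PURCHASE_CREATE),
--     ([_PARCEL, _mask_of(("apagar", "apago", "excluir", "remover", "desfazer"))], 0, MSG_INSTALLMENT_DELETE),
--     ([_PARCEL, _mask_of(("fazer", "faco", "faço", "criar", "registrar", "parcelar"))], 0, MSG_INSTALLMENT_CREATE),
--     ([_BOX, _mask_of(("fazer", "faco", "faço", "criar", "abrir"))], 0, MSG_BOX_CREATE),
--     ([_BOX, _mask_of(("colocar", "depositar", "guardar"))], 0, MSG_BOX_DEPOSIT),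
--     ([_mask_of(("ofx", "extrato")), _mask_of(("importar", "enviar"))], 0, MSG_OFX),
--     ([_mask_of(("fatura",)), _mask_of(("ver", "consultar", "pagar", "registrar"))], 0, MSG_INVOICE),
-- ]
--
--
-- def _infer_precise_help(norm: str) -> str | None:
--     mask = 0
--     for i, w in enumerate(_KEYWORDS):
--         if w in norm:
--             mask |= 1 << i
--     for req, forb, msg in _RULES:
--         if all(mask & g for g in req) and not (mask & forb):
--             return msg
--     return None
-- ===== Notes on version B (the rewrite author's own statement) =====
-- stated objective: alternative
-- what changed: A's nested if-blocks of repeated substring tests are replaced by a single pass that builds an integer bitmask of which keywords occur in norm, after which each rule is a pure bitwise test (mask & group, mask & forbidden) against precomputed constant masks scanned in A's order.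
import Mathlib
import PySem

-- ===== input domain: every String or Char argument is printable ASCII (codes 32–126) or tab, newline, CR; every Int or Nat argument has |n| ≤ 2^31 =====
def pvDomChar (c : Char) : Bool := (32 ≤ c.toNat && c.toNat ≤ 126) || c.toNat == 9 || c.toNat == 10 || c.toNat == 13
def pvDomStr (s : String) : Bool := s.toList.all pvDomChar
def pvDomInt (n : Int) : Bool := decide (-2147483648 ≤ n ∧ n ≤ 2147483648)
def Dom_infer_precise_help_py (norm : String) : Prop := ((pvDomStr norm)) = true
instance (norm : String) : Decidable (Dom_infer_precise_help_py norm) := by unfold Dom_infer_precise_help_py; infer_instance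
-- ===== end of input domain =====

-- B replaces A's nested substring-test chain by a single pass that builds an integer
-- bitmask of the keywords present in `norm`, then scans rules given as constant bitmasks
-- with pure bitwise tests; objective: alternative, not faster.

-- shared message literals (plain constants used by both ports)
def msgCardDelete : String :=
  "🗑️ Para apagar um cartão, use o nome dele.\nExemplo: `excluir cartao Nubank`.\n\nEu vou pedir confirmação antes de remover."
def msgEntryCreate : String :=
  "🧾 Para fazer um lançamento, você pode usar:\n• `gastei 50 mercado`\n• `recebi 1000 salario`\n\nSe quiser ver depois, use `listar lançamentos`."
def msgEntryDelete : String :=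
  "🗑️ Para apagar um lançamento comum, use o número dele.\nExemplo: `apagar 17`."
def msgPurchaseDelete : String :=
  "🗑️ Para apagar uma compra no crédito, use o código dela.\nExemplo: `apagar CC17`."
def msgPurchaseCreate : String :=
  "💳 Para registrar uma compra no crédito, use:\n• `credito 150 mercado`\n• `credito Nubank 150 mercado`\n• `gastei 150 no cartao Nubank`\n\nDepois eu mostro um código como `CC17` para você apagar com `apagar CC17`."
def msgInstallmentDelete : String :=
  "🗑️ Para apagar um parcelamento, use o código dele.\nExemplo: `apagar PCAB12CD34`.\n\nSe quiser descobrir o código, mande `parcelamentos`."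
def msgInstallmentCreate : String :=
  "💳 Para parcelar uma compra, use:\n• `parcelar 600 em 3x no cartao Nubank`\n• `parcelei 300 em 6x no cartao Nubank`"
def msgBoxCreate : String :=
  "📦 Para criar uma caixinha, use:\n• `criar caixinha viagem`"
def msgBoxDeposit : String :=
  "📦 Para colocar dinheiro numa caixinha, use:\n• `coloquei 300 na caixinha viagem`"
def msgOfx : String :=
  "🧾 Para importar um OFX, envie o arquivo `.ofx` junto com a mensagem:\n• `importar ofx`"
def msgInvoice : String :=
  "🧾 Para consultar ou pagar uma fatura, use:\n• `fatura Nubank`\n• `listar faturas`\n• `pagar fatura Nubank 1200`\n• `pagar fatura Nubank com saldo`"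

-- ===== PORT A =====
-- any(expr in norm for expr in (...))
def aAnyIn (norm : String) (ws : List String) : Bool := ws.any (fun w => PySem.Str.isIn w norm)

-- the successive fall-through points of A's if-chain, bottom-up
def aStep8 (norm : String) : Option String :=
  if PySem.Str.isIn "fatura" norm && aAnyIn norm ["ver", "consultar", "pagar", "registrar"] then
    some msgInvoice
  else none

def aStep7 (norm : String) : Option String :=
  if aAnyIn norm ["ofx", "extrato"] && aAnyIn norm ["importar", "enviar"] then
    some msgOfx
  else aStep8 norm

def aStep6 (norm : String) : Option String :=
  if PySem.Str.isIn "caixinha" norm || PySem.Str.isIn "caixinhas" norm then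
    if aAnyIn norm ["fazer", "faco", "faço", "criar", "abrir"] then some msgBoxCreate
    else if aAnyIn norm ["colocar", "depositar", "guardar"] then some msgBoxDeposit
    else aStep7 norm
  else aStep7 norm

def aStep5 (norm : String) : Option String :=
  if aAnyIn norm ["parcela", "parcelas", "parcelamento"] then
    if aAnyIn norm ["apagar", "apago", "excluir", "remover", "desfazer"] then some msgInstallmentDelete
    else if aAnyIn norm ["fazer", "faco", "faço", "criar", "registrar", "parcelar"] then some msgInstallmentCreate
    else aStep6 norm
  else aStep6 norm

def aStep4 (norm : String) : Option String :=
  if aAnyIn norm ["compra", "compras"] && aAnyIn norm ["cartao", "cartão", "credito", "crédito"] then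
    if aAnyIn norm ["apagar", "apago", "excluir", "remover", "desfazer"] then some msgPurchaseDelete
    else if aAnyIn norm ["fazer", "faco", "faço", "registrar", "lancar", "lançar"] then some msgPurchaseCreate
    else aStep5 norm
  else aStep5 norm

def aStep3 (norm : String) : Option String :=
  if aAnyIn norm ["lancamento", "lançamento", "lancamentos", "lançamentos"] then
    if aAnyIn norm ["fazer", "faco", "faço", "criar", "registrar"] then some msgEntryCreate
    else if aAnyIn norm ["apagar", "apago", "excluir", "remover"] then some msgEntryDelete
    else aStep4 norm
  else aStep4 norm

def infer_precise_help_py (norm : String) : Option String :=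
  if PySem.Str.isIn "cartao" norm || PySem.Str.isIn "cartão" norm
      || PySem.Str.isIn "cartoes" norm || PySem.Str.isIn "cartões" norm then
    if aAnyIn norm ["apagar", "apago", "excluir", "remover", "deletar"] && !PySem.Str.isIn "compra" norm then
      some msgCardDelete
    else aStep3 norm
  else aStep3 norm

-- ===== PORT B =====
-- the keyword universe; one bit of the mask per keyword, in list order
def bKeywords : List String :=
  ["cartao", "cartão", "cartoes", "cartões",
   "apagar", "apago", "excluir", "remover", "deletar",
   "compra", "compras",
   "lancamento", "lançamento", "lancamentos", "lançamentos",
   "ver", "consultar", "pagar",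
   "fazer", "faco", "faço", "criar", "registrar",
   "credito", "crédito", "desfazer", "lancar", "lançar",
   "parcela", "parcelas", "parcelamento", "parcelar",
   "caixinha", "caixinhas", "abrir",
   "colocar", "depositar", "guardar",
   "ofx", "extrato", "importar", "enviar",
   "fatura"]

-- _mask_of: sum of 1 << _KEYWORDS.index(w); every w is in bKeywords, so getD 0 is never used
def bMaskOf (ws : List String) : Nat :=
  ws.foldl (fun m w => m + (1 <<< ((PySem.List.index? bKeywords w).getD 0))) 0

-- _RULES: (required group masks, forbidden mask, message), in A's order
def bRules : List (List Nat × Nat × String) :=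
  [ ([bMaskOf ["cartao", "cartão", "cartoes", "cartões"],
      bMaskOf ["apagar", "apago", "excluir", "remover", "deletar"]],
     bMaskOf ["compra"], msgCardDelete),
    ([bMaskOf ["lancamento", "lançamento", "lancamentos", "lançamentos"],
      bMaskOf ["fazer", "faco", "faço", "criar", "registrar"]], 0, msgEntryCreate),
    ([bMaskOf ["lancamento", "lançamento", "lancamentos", "lançamentos"],
      bMaskOf ["apagar", "apago", "excluir", "remover"]], 0, msgEntryDelete),
    ([bMaskOf ["compra", "compras"], bMaskOf ["cartao", "cartão", "credito", "crédito"],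
      bMaskOf ["apagar", "apago", "excluir", "remover", "desfazer"]], 0, msgPurchaseDelete),
    ([bMaskOf ["compra", "compras"], bMaskOf ["cartao", "cartão", "credito", "crédito"],
      bMaskOf ["fazer", "faco", "faço", "registrar", "lancar", "lançar"]], 0, msgPurchaseCreate),
    ([bMaskOf ["parcela", "parcelas", "parcelamento"],
      bMaskOf ["apagar", "apago", "excluir", "remover", "desfazer"]], 0, msgInstallmentDelete),
    ([bMaskOf ["parcela", "parcelas", "parcelamento"],
      bMaskOf ["fazer", "faco", "faço", "criar", "registrar", "parcelar"]], 0, msgInstallmentCreate),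
    ([bMaskOf ["caixinha", "caixinhas"],
      bMaskOf ["fazer", "faco", "faço", "criar", "abrir"]], 0, msgBoxCreate),
    ([bMaskOf ["caixinha", "caixinhas"],
      bMaskOf ["colocar", "depositar", "guardar"]], 0, msgBoxDeposit),
    ([bMaskOf ["ofx", "extrato"], bMaskOf ["importar", "enviar"]], 0, msgOfx),
    ([bMaskOf ["fatura"], bMaskOf ["ver", "consultar", "pagar", "registrar"]], 0, msgInvoice) ]

-- the one-pass loop: mask |= 1 << i for each present keyword
def bMask (norm : String) : Nat :=
  (PySem.List.enumerate bKeywords).foldl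
    (fun m p => if PySem.Str.isIn p.2 norm then m ||| (1 <<< p.1.toNat) else m) 0

def infer_precise_help_py_alt (norm : String) : Option String :=
  let mask := bMask norm
  (bRules.find? (fun r => r.1.all (fun g => mask &&& g != 0) && (mask &&& r.2.1 == 0))).map
    (fun r => r.2.2)

-- ===== PRECONDITION & SPEC =====
def Spec_infer_precise_help_py (norm : String) (out : Option String) : Prop := out = infer_precise_help_py_alt norm
instance (norm : String) (out : Option String) : Decidable (Spec_infer_precise_help_py norm out) := by unfold Spec_infer_precise_help_py; infer_instance

-- ===== CLAIM (what is proved, stated in full; the proofs are below) =====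
def Claim_equal_infer_precise_help_py : Prop := ∀ (norm : String), Dom_infer_precise_help_py norm → Spec_infer_precise_help_py norm (infer_precise_help_py norm)

-- ===== LEMMAS AND PROOFS =====

-- a fall-through group with one inner rule flattens to a conjunction
theorem flatten1 {α : Type} (a b : Bool) (x r : α) :
    (if a then (if b then x else r) else r) = if a && b then x else r := by
  cases a <;> simp

-- a fall-through group with two inner rules flattens to two conjunctions
theorem flatten2 {α : Type} (a b c : Bool) (x y r : α) :
    (if a then (if b then x else if c then y else r) else r) =
      if a && b then x else if a && c then y else r := by
  cases a <;> simp

-- map∘find? over a literal rule table peels one rule at a time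
theorem map_find?_cons {α β : Type} (f : α → β) (p : α → Bool) (x : α) (l : List α) :
    (List.find? p (x :: l)).map f = if p x then some (f x) else (List.find? p l).map f := by
  by_cases h : p x
  · simp [List.find?_cons_of_pos h, h]
  · simp [List.find?_cons_of_neg h, h]

-- a power of two meets a mask iff the mask has that bit
theorem pow_land_bne (i C : Nat) : (((1 <<< i) &&& C) != 0) = C.testBit i := by
  rw [Nat.one_shiftLeft, Nat.land_comm, Nat.and_two_pow]
  cases hC : C.testBit i <;> simp

-- a bitwise or vanishes iff both sides do
theorem or_eq_zero (x y : Nat) : x ||| y = 0 ↔ x = 0 ∧ y = 0 := by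
  constructor
  · intro h
    have hb : ∀ i, (x.testBit i || y.testBit i) = false := by
      intro i
      have := congrArg (fun n => Nat.testBit n i) h
      simpa [Nat.testBit_or] using this
    refine ⟨Nat.eq_of_testBit_eq fun i => ?_, Nat.eq_of_testBit_eq fun i => ?_⟩ <;>
      simp [Nat.zero_testBit] <;> rcases Bool.or_eq_false_iff.mp (hb i) with ⟨h1, h2⟩
    · exact h1
    · exact h2
  · rintro ⟨rfl, rfl⟩
    simp

theorem or_bne_zero (x y : Nat) : ((x ||| y) != 0) = ((x != 0) || (y != 0)) := by
  rw [Bool.eq_iff_iff]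
  simp [bne_iff_ne, or_eq_zero]
  tauto

-- the masked test against the accumulating loop = 'some keyword with a bit in C occurs'
theorem mask_land_bne (norm : String) (ps : List (Int × String)) (m C : Nat) :
    ((ps.foldl (fun m p => if PySem.Str.isIn p.2 norm then m ||| (1 <<< p.1.toNat) else m) m) &&& C != 0)
      = ((m &&& C != 0) || ps.any (fun p => C.testBit p.1.toNat && PySem.Str.isIn p.2 norm)) := by
  induction ps generalizing m with
  | nil => simp
  | cons p t ih =>
      rw [List.foldl_cons, List.any_cons, ih]
      by_cases h : PySem.Str.isIn p.2 norm
      · rw [if_pos h, h, Bool.and_true]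
        have hd : (m ||| (1 <<< p.1.toNat)) &&& C = (m &&& C) ||| ((1 <<< p.1.toNat) &&& C) := by
          rw [Nat.land_comm, Nat.and_or_distrib_left, Nat.land_comm C m, Nat.land_comm C]
        rw [hd, or_bne_zero, pow_land_bne, Bool.or_assoc]
      · rw [if_neg h]
        simp only [Bool.not_eq_true] at h
        rw [h, Bool.and_false, Bool.false_or]

theorem mask_land_beq (norm : String) (ps : List (Int × String)) (m C : Nat) :
    ((ps.foldl (fun m p => if PySem.Str.isIn p.2 norm then m ||| (1 <<< p.1.toNat) else m) m) &&& C == 0)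
      = !((m &&& C != 0) || ps.any (fun p => C.testBit p.1.toNat && PySem.Str.isIn p.2 norm)) := by
  rw [← mask_land_bne norm ps m C]
  simp [bne]

-- a group test over the bitmask reduces to 'any of the group's keywords occurs',
-- given (checked by decide) that C's bits select exactly the words ws from bKeywords
theorem group_any (C : Nat) (ws : List String)
    (h : ((PySem.List.enumerate bKeywords).filter (fun p => C.testBit p.1.toNat)).map Prod.snd = ws)
    (norm : String) :
    ((PySem.List.enumerate bKeywords).any (fun p => C.testBit p.1.toNat && PySem.Str.isIn p.2 norm))
      = ws.any (fun w => PySem.Str.isIn w norm) := by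
  subst h
  rw [List.any_map, List.any_filter]
  rfl

-- ===== VERDICT (by name: the statement is the Claim_ definition above) =====
theorem infer_precise_help_py_spec : Claim_equal_infer_precise_help_py := by
  intro norm _
  unfold Spec_infer_precise_help_py
  have gCard := group_any (bMaskOf ["cartao", "cartão", "cartoes", "cartões"])
    ["cartao", "cartão", "cartoes", "cartões"] (by decide) norm
  have gDelD := group_any (bMaskOf ["apagar", "apago", "excluir", "remover", "deletar"])
    ["apagar", "apago", "excluir", "remover", "deletar"] (by decide) norm
  have gCompra := group_any (bMaskOf ["compra"]) ["compra"] (by decide) norm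
  have gEntry := group_any (bMaskOf ["lancamento", "lançamento", "lancamentos", "lançamentos"])
    ["lancamento", "lançamento", "lancamentos", "lançamentos"] (by decide) norm
  have gCreate5 := group_any (bMaskOf ["fazer", "faco", "faço", "criar", "registrar"])
    ["fazer", "faco", "faço", "criar", "registrar"] (by decide) norm
  have gDel4 := group_any (bMaskOf ["apagar", "apago", "excluir", "remover"])
    ["apagar", "apago", "excluir", "remover"] (by decide) norm
  have gPur := group_any (bMaskOf ["compra", "compras"]) ["compra", "compras"] (by decide) norm
  have gCtx := group_any (bMaskOf ["cartao", "cartão", "credito", "crédito"])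
    ["cartao", "cartão", "credito", "crédito"] (by decide) norm
  have gDelU := group_any (bMaskOf ["apagar", "apago", "excluir", "remover", "desfazer"])
    ["apagar", "apago", "excluir", "remover", "desfazer"] (by decide) norm
  have gCreate6 := group_any (bMaskOf ["fazer", "faco", "faço", "registrar", "lancar", "lançar"])
    ["fazer", "faco", "faço", "registrar", "lancar", "lançar"] (by decide) norm
  have gParcel := group_any (bMaskOf ["parcela", "parcelas", "parcelamento"])
    ["parcela", "parcelas", "parcelamento"] (by decide) norm
  have gCreateP := group_any (bMaskOf ["fazer", "faco", "faço", "criar", "registrar", "parcelar"])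
    ["fazer", "faco", "faço", "criar", "registrar", "parcelar"] (by decide) norm
  have gBox := group_any (bMaskOf ["caixinha", "caixinhas"]) ["caixinha", "caixinhas"] (by decide) norm
  have gCreateB := group_any (bMaskOf ["fazer", "faco", "faço", "criar", "abrir"])
    ["fazer", "faco", "faço", "criar", "abrir"] (by decide) norm
  have gDeposit := group_any (bMaskOf ["colocar", "depositar", "guardar"])
    ["colocar", "depositar", "guardar"] (by decide) norm
  have gOfx := group_any (bMaskOf ["ofx", "extrato"]) ["ofx", "extrato"] (by decide) norm
  have gImp := group_any (bMaskOf ["importar", "enviar"]) ["importar", "enviar"] (by decide) norm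
  have gFat := group_any (bMaskOf ["fatura"]) ["fatura"] (by decide) norm
  have gInv := group_any (bMaskOf ["ver", "consultar", "pagar", "registrar"])
    ["ver", "consultar", "pagar", "registrar"] (by decide) norm
  -- unroll B's rule scan, turn every bitwise test into a keyword disjunction
  simp only [infer_precise_help_py_alt, bRules, bMask]
  simp only [map_find?_cons, List.find?_nil, Option.map_none, List.all_cons, List.all_nil,
    Bool.and_true, Nat.and_zero, beq_self_eq_true]
  simp only [mask_land_bne, mask_land_beq]
  simp only [gCard, gDelD, gCompra, gEntry, gCreate5, gDel4, gPur, gCtx, gDelU, gCreate6,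
    gParcel, gCreateP, gBox, gCreateB, gDeposit, gOfx, gImp, gFat, gInv]
  simp only [Nat.zero_and, bne_self_eq_false, Bool.false_or]
  -- flatten A's nested fall-through blocks into the same chain
  simp only [infer_precise_help_py, aStep3, aStep4, aStep5, aStep6, aStep7, aStep8,
    flatten2, flatten1, aAnyIn]
  -- normalise the boolean conditions of both chains to one form
  simp only [List.any_cons, List.any_nil, Bool.or_false, Bool.or_assoc,
    Bool.and_assoc]
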